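-- pv_equiv track=rewrite | github.com/DS3Lab/DocParser | docparser/stage2_structure_parser.py | get_remaining_y_ranges_based_on_page_height
-- ===== SOURCE A (Python) =====
-- def get_remaining_y_ranges_based_on_page_height(sorted_center_y_ranges, height):
--     all_remaining_vertical_page_ranges = []
--     if len(sorted_center_y_ranges) > 0:
--         prev_y_end = 0
--         for center_y_range in sorted_center_y_ranges:
--             new_vertical_range = [prev_y_end, center_y_range[0]]
--             prev_y_end = center_y_range[1]
--             all_remaining_vertical_page_ranges.append(new_vertical_range)
--         new_vertical_range = [prev_y_end, height]
--         all_remaining_vertical_page_ranges.append(new_vertical_range)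
--     else:
--         all_remaining_vertical_page_ranges = [[0, height]]
--     return all_remaining_vertical_page_ranges
-- ===== SOURCE B (Python) =====
-- def get_remaining_y_ranges_based_on_page_height(sorted_center_y_ranges, height):
--     ends = [0] + [r[1] for r in sorted_center_y_ranges]
--     starts = [r[0] for r in sorted_center_y_ranges] + [height]
--     return [[e, s] for e, s in zip(ends, starts)]
-- ===== Notes on version B (the rewrite author's own statement) =====
-- stated objective: simpler
-- what changed: Replaces the stateful prev_y_end loop and the empty/non-empty if/else by two shifted boundary lists (ends = [0]+range ends, starts = range starts+[height]) zipped into pairs; the empty case falls out for free.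
import Mathlib
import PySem

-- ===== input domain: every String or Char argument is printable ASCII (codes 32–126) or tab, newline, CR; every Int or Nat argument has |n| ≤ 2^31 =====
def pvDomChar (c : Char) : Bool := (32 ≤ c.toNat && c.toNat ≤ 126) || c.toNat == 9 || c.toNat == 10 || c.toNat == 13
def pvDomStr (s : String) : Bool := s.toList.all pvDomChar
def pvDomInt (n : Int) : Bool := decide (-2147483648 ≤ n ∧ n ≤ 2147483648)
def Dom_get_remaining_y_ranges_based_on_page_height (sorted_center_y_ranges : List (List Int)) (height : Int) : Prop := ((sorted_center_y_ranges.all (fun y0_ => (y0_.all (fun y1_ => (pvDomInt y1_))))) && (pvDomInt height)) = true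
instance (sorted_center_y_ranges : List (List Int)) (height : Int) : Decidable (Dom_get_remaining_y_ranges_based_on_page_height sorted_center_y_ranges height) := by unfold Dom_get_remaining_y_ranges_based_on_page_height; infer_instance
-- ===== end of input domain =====

-- B replaces A's stateful prev_y_end loop by two shifted boundary lists zipped into pairs (simpler decomposition; return value only, no mutation).

-- ===== PORT A =====
-- A's loop: accumulator (output list so far, prev_y_end); r[0]/r[1] via pyGet? (in range under Pre_).
def get_remaining_y_ranges_based_on_page_height (sorted_center_y_ranges : List (List Int)) (height : Int) : List (List Int) :=
  if sorted_center_y_ranges.length > 0 then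
    let st := sorted_center_y_ranges.foldl
      (fun (acc : List (List Int) × Int) r =>
        (acc.1 ++ [[acc.2, (PySem.List.pyGet? r 0).getD 0]], (PySem.List.pyGet? r 1).getD 0))
      ([], 0)
    st.1 ++ [[st.2, height]]
  else [[0, height]]

-- ===== PORT B =====
def get_remaining_y_ranges_based_on_page_height_alt (sorted_center_y_ranges : List (List Int)) (height : Int) : List (List Int) :=
  let ends := 0 :: sorted_center_y_ranges.map (fun r => (PySem.List.pyGet? r 1).getD 0)
  let starts := sorted_center_y_ranges.map (fun r => (PySem.List.pyGet? r 0).getD 0) ++ [height]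
  (ends.zip starts).map (fun p => [p.1, p.2])

-- ===== PRECONDITION & SPEC =====
-- Pre_ excludes exactly the inputs where Python A raises IndexError: an inner list with fewer than 2 elements (center_y_range[1]).
def Pre_get_remaining_y_ranges_based_on_page_height (sorted_center_y_ranges : List (List Int)) (height : Int) : Prop :=
  ∀ r ∈ sorted_center_y_ranges, 2 ≤ r.length
instance (sorted_center_y_ranges : List (List Int)) (height : Int) : Decidable (Pre_get_remaining_y_ranges_based_on_page_height sorted_center_y_ranges height) := by unfold Pre_get_remaining_y_ranges_based_on_page_height; infer_instance
def pvWitness_get_remaining_y_ranges_based_on_page_height : List (List Int) × Int := ([[1, 2], [4, 6]], 10)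

def Spec_get_remaining_y_ranges_based_on_page_height (sorted_center_y_ranges : List (List Int)) (height : Int) (out : List (List Int)) : Prop := out = get_remaining_y_ranges_based_on_page_height_alt sorted_center_y_ranges height
instance (sorted_center_y_ranges : List (List Int)) (height : Int) (out : List (List Int)) : Decidable (Spec_get_remaining_y_ranges_based_on_page_height sorted_center_y_ranges height out) := by unfold Spec_get_remaining_y_ranges_based_on_page_height; infer_instance

-- ===== CLAIM (what is proved, stated in full; the proofs are below) =====
def Claim_equal_get_remaining_y_ranges_based_on_page_height : Prop := ∀ (sorted_center_y_ranges : List (List Int)) (height : Int), Dom_get_remaining_y_ranges_based_on_page_height sorted_center_y_ranges height → Pre_get_remaining_y_ranges_based_on_page_height sorted_center_y_ranges height → Spec_get_remaining_y_ranges_based_on_page_height sorted_center_y_ranges height (get_remaining_y_ranges_based_on_page_height sorted_center_y_ranges height)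

-- ===== LEMMAS AND PROOFS =====
-- A's loop with accumulator (acc, prev) produces acc ++ the zipped boundary lists starting at prev.
lemma pv_loop_eq (height : Int) :
    ∀ (xs : List (List Int)) (acc : List (List Int)) (prev : Int),
      (let st := xs.foldl
        (fun (acc : List (List Int) × Int) r =>
          (acc.1 ++ [[acc.2, (PySem.List.pyGet? r 0).getD 0]], (PySem.List.pyGet? r 1).getD 0))
        (acc, prev)
       st.1 ++ [[st.2, height]])
      = acc ++ ((prev :: xs.map (fun r => (PySem.List.pyGet? r 1).getD 0)).zip
          (xs.map (fun r => (PySem.List.pyGet? r 0).getD 0) ++ [height])).map (fun p => [p.1, p.2]) := by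
  intro xs
  induction xs with
  | nil => intro acc prev; simp
  | cons r rest ih =>
      intro acc prev
      simp only [List.foldl_cons, List.map_cons, List.zip_cons_cons, List.map, List.cons_append]
      rw [ih]
      simp

-- ===== VERDICT (by name: the statement is the Claim_ definition above) =====
theorem get_remaining_y_ranges_based_on_page_height_spec : Claim_equal_get_remaining_y_ranges_based_on_page_height := by
  intro xs height _ _
  unfold Spec_get_remaining_y_ranges_based_on_page_height
  unfold get_remaining_y_ranges_based_on_page_height get_remaining_y_ranges_based_on_page_height_alt
  by_cases h : xs.length > 0
  · simp only [h, if_pos]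
    exact pv_loop_eq height xs [] 0
  · have : xs = [] := List.eq_nil_of_length_eq_zero (by omega)
    subst this; simp
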